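-- pv_equiv track=rewrite | github.com/godie007/rag-chroma | backend/app/evolution_webhook.py | _incoming_sender_allowed
-- ===== SOURCE A (Python) =====
-- def _jid_user_digits(remote_jid: str) -> str:
--     """Parte usuario del JID 1:1 solo dígitos (p. ej. 573136413967 desde 573136413967@s.whatsapp.net)."""
--     if "@g.us" in remote_jid:
--         return ""
--     user = remote_jid.split("@", 1)[0]
--     user = user.split(":", 1)[0]
--     return "".join(c for c in user if c.isdigit())
--
-- def _incoming_sender_allowed(remote_jid: str, allowed: frozenset[str]) -> bool:
--     if not allowed:
--         return True
--     d = _jid_user_digits(remote_jid)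
--     if not d:
--         return False
--     if d in allowed:
--         return True
--     for a in allowed:
--         if len(a) >= 9 and d.endswith(a):
--             return True
--     return False
-- ===== SOURCE B (Python) =====
-- def _incoming_sender_allowed(remote_jid, allowed):
--     # Different decomposition: reject group JIDs up front, extract digits in one
--     # char loop with break, and test the >=9-long suffixes of d for set membership
--     # instead of scanning allowed with endswith.
--     if not allowed:
--         return True
--     if "@g.us" in remote_jid:
--         return False
--     digits = []
--     for c in remote_jid:
--         if c == "@" or c == ":":
--             break
--         if c.isdigit():
--             digits.append(c)
--     d = "".join(digits)
--     if not d: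
--         return False
--     n = len(d)
--     return d in allowed or any(d[k:] in allowed for k in range(1, n - 8))
-- ===== Notes on version B (the rewrite author's own statement) =====
-- stated objective: alternative
-- what changed: B drops the helper: it rejects group JIDs up front, extracts the digits in one break-on-@/: character loop instead of two splits plus a filter, and replaces A's scan of allowed with endswith by enumerating the >=9-long proper suffixes d[k:] and testing set membership, so matching no longer iterates over allowed.
import Mathlib
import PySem

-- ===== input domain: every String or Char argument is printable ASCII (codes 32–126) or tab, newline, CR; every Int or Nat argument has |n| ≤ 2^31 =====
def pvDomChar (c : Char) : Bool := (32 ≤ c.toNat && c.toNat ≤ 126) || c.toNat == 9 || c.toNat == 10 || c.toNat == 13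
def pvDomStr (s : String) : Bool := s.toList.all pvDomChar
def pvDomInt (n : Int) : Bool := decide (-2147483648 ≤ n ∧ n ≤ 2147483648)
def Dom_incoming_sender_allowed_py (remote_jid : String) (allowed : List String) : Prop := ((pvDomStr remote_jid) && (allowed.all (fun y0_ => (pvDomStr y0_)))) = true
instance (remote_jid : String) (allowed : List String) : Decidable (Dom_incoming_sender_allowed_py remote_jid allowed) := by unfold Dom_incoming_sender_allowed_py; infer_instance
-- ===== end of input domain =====

-- B rejects group JIDs up front, extracts digits in one break-on-@/: character loop
-- (instead of two splits plus a filter), and tests the ≥9-long proper suffixes of the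
-- digit string for set membership instead of scanning `allowed` with endswith
-- (an alternative algorithm, same result).


-- ===== PORT A =====
-- module helper _jid_user_digits, as Source A writes it: substring test, two splits, filter
def jid_user_digits_py (remote_jid : String) : String :=
  if PySem.Str.isIn "@g.us" remote_jid then ""
  else
    let user := (((PySem.Str.splitMax? remote_jid "@" 1).getD []).headD "")
    let user := (((PySem.Str.splitMax? user ":" 1).getD []).headD "")
    String.ofList (user.toList.filter PySem.Chars.isdigit)

def incoming_sender_allowed_py (remote_jid : String) (allowed : List String) : Bool :=
  if allowed.isEmpty then true
  else
    let d := jid_user_digits_py remote_jid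
    if d == "" then false
    else if allowed.contains d then true
    else allowed.any (fun a => decide (9 ≤ PySem.Str.len a) && PySem.Str.endswith d a)

-- ===== PORT B =====
-- Source B's character loop: break at '@' or ':', keep digits
def pvCollectDigits : List Char → List Char
  | [] => []
  | c :: rest =>
    if c == '@' || c == ':' then []
    else if PySem.Chars.isdigit c then c :: pvCollectDigits rest
    else pvCollectDigits rest

def incoming_sender_allowed_py_alt (remote_jid : String) (allowed : List String) : Bool :=
  if allowed.isEmpty then true
  else if PySem.Str.isIn "@g.us" remote_jid then false
  else
    let d := String.ofList (pvCollectDigits remote_jid.toList)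
    if d == "" then false
    else
      allowed.contains d ||
        (PySem.List.pyRange 1 (PySem.Str.len d - 8) 1).any
          (fun k => allowed.contains (PySem.Str.slice d (some k) none))

-- ===== PRECONDITION & SPEC =====
def Spec_incoming_sender_allowed_py (remote_jid : String) (allowed : List String) (out : Bool) : Prop := out = incoming_sender_allowed_py_alt remote_jid allowed
instance (remote_jid : String) (allowed : List String) (out : Bool) : Decidable (Spec_incoming_sender_allowed_py remote_jid allowed out) := by unfold Spec_incoming_sender_allowed_py; infer_instance

-- ===== CLAIM (what is proved, stated in full; the proofs are below) =====
def Claim_equal_incoming_sender_allowed_py : Prop := ∀ (remote_jid : String) (allowed : List String), Dom_incoming_sender_allowed_py remote_jid allowed → Spec_incoming_sender_allowed_py remote_jid allowed (incoming_sender_allowed_py remote_jid allowed)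

-- ===== LEMMAS AND PROOFS =====

-- split's worker with maxsplit exhausted returns the remainder as one last piece
theorem go_msplit_zero (sep : List Char) (fuel : Nat) (l : List Char) (acc : List (List Char)) :
    PySem.Chars.splitOnMax.go sep fuel 0 l [] acc = acc.reverse ++ [l] := by
  cases fuel with
  | zero => simp [PySem.Chars.splitOnMax.go]
  | succ f => cases l <;> simp [PySem.Chars.splitOnMax.go]

-- first piece of a single-char split with maxsplit 1 = takeWhile (· ≠ ch)
theorem go_msplit_one_head (ch : Char) :
    ∀ (l : List Char) (fuel : Nat) (cur : List Char) (acc : List (List Char)),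
      l.length ≤ fuel →
      ∃ tail, PySem.Chars.splitOnMax.go [ch] fuel 1 l cur acc
        = acc.reverse ++ (cur.reverse ++ l.takeWhile (· != ch)) :: tail := by
  intro l
  induction l with
  | nil =>
    intro fuel cur acc _
    cases fuel <;> exact ⟨[], by simp [PySem.Chars.splitOnMax.go]⟩
  | cons c rest ih =>
    intro fuel cur acc hf
    cases fuel with
    | zero => simp at hf
    | succ f =>
      by_cases hc : c = ch
      · subst hc
        refine ⟨[rest], ?_⟩
        simp only [PySem.Chars.splitOnMax.go, List.isPrefixOf, if_neg (by omega : ¬ (1 = 0))]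
        simp [go_msplit_zero]
      · obtain ⟨tail, htail⟩ := ih f (c :: cur) acc (by simpa using hf)
        refine ⟨tail, ?_⟩
        simp only [PySem.Chars.splitOnMax.go, if_neg (by omega : ¬ (1 = 0))]
        rw [if_neg (by simp [List.isPrefixOf]; exact fun h => hc h.symm)]
        rw [htail]
        simp [hc]
  
theorem splitMax_one_head (ch : Char) (s : String) :
    (((PySem.Str.splitMax? s (String.ofList [ch]) 1).getD []).headD "").toList
      = s.toList.takeWhile (· != ch) := by
  obtain ⟨tail, h⟩ := go_msplit_one_head ch s.toList (s.length + 1) [] []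
    (by simp [String.length_toList])
  simp only [PySem.Str.splitMax?, PySem.Chars.splitMax?, PySem.Chars.splitOnMax,
    String.toList_ofList]
  rw [if_neg (by simp), if_neg (by omega : ¬ (1:Int) < 0)]
  simp [h]

theorem collect_digits_eq (l : List Char) :
    pvCollectDigits l
      = ((l.takeWhile (· != '@')).takeWhile (· != ':')).filter PySem.Chars.isdigit := by
  induction l with
  | nil => rfl
  | cons c rest ih =>
    by_cases h1 : c = '@'
    · subst h1; simp [pvCollectDigits]
    · by_cases h2 : c = ':'
      · subst h2; simp [pvCollectDigits]
      · simp only [pvCollectDigits, List.takeWhile_cons]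
        rw [if_neg (by simp [h1, h2])]
        simp [h1, h2, List.filter_cons, ih]

-- when the JID is not a group JID, A's helper computes exactly B's digit loop
theorem jid_digits_eq (s : String) (hg : PySem.Str.isIn "@g.us" s = false) :
    jid_user_digits_py s = String.ofList (pvCollectDigits s.toList) := by
  unfold jid_user_digits_py
  rw [if_neg (by simpa using hg)]
  apply String.toList_inj.mp
  have h1 : ("@" : String) = String.ofList ['@'] := rfl
  have h2 : (":" : String) = String.ofList [':'] := rfl
  rw [h1, h2]
  simp only [String.toList_ofList]
  rw [splitMax_one_head, splitMax_one_head, collect_digits_eq]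

-- the core exchange: scanning allowed for a ≥9-long suffix of d = scanning the ≥9-long
-- proper suffixes d[k:] of d for membership in allowed (given d itself is not in allowed)
theorem suffix_scan_eq (d : String) (allowed : List String)
    (hd : allowed.contains d = false) :
    allowed.any (fun a => decide (9 ≤ PySem.Str.len a) && PySem.Str.endswith d a)
      = (PySem.List.pyRange 1 (PySem.Str.len d - 8) 1).any
          (fun k => allowed.contains (PySem.Str.slice d (some k) none)) := by
  have hdmem : d ∉ allowed := by simpa using hd
  rw [Bool.eq_iff_iff]
  simp only [List.any_eq_true, List.contains_iff_mem,
    PySem.List.mem_pyRange_one, Bool.and_eq_true, decide_eq_true_eq]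
  constructor
  · rintro ⟨a, ha, h9, hsuf⟩
    have hsuf' : a.toList <:+ d.toList := by
      rw [PySem.Str.endswith_eq] at hsuf
      exact (PySem.Chars.endswith_iff _ _).mp hsuf
    have hle : a.toList.length ≤ d.toList.length := hsuf'.length_le
    have h9' : 9 ≤ a.toList.length := by
      rw [PySem.Str.len_eq] at h9; exact_mod_cast h9
    have hlt : a.toList.length < d.toList.length := by
      rcases lt_or_eq_of_le hle with h | h
      · exact h
      · exact absurd (String.toList_inj.mp (hsuf'.eq_of_length h)) (fun he => hdmem (he ▸ ha))
    refine ⟨((d.toList.length - a.toList.length : Nat) : Int), ⟨by omega, ?_⟩, ?_⟩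
    · rw [PySem.Str.len_eq]; omega
    · have hs : PySem.Str.slice d (some ((d.toList.length - a.toList.length : Nat) : Int)) none = a := by
        apply String.toList_inj.mp
        rw [PySem.Str.toList_slice, PySem.Chars.slice_eq_listSlice,
          PySem.List.slice_from_natCast]
        exact (List.suffix_iff_eq_drop.mp hsuf').symm
      rw [hs]; exact ha
  · rintro ⟨k, ⟨h1, hk⟩, hmem⟩
    refine ⟨PySem.Str.slice d (some k) none, hmem, ?_, ?_⟩
    · have hkN : k = ((k.toNat : Nat) : Int) := by omega
      rw [PySem.Str.len_eq, PySem.Str.toList_slice, PySem.Chars.slice_eq_listSlice, hkN,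
        PySem.List.slice_from_natCast]
      rw [PySem.Str.len_eq] at hk
      simp only [List.length_drop]
      omega
    · rw [PySem.Str.endswith_eq]
      apply (PySem.Chars.endswith_iff _ _).mpr
      have hkN : k = ((k.toNat : Nat) : Int) := by omega
      rw [PySem.Str.toList_slice, PySem.Chars.slice_eq_listSlice, hkN,
        PySem.List.slice_from_natCast]
      exact List.drop_suffix _ _

-- ===== VERDICT (by name: the statement is the Claim_ definition above) =====
theorem incoming_sender_allowed_py_spec : Claim_equal_incoming_sender_allowed_py := by
  intro remote_jid allowed _
  unfold Spec_incoming_sender_allowed_py incoming_sender_allowed_py incoming_sender_allowed_py_alt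
  by_cases h1 : allowed.isEmpty = true
  · rw [if_pos h1, if_pos h1]
  · rw [if_neg h1, if_neg h1]
    by_cases hg : PySem.Str.isIn "@g.us" remote_jid = true
    · rw [if_pos hg]
      have : jid_user_digits_py remote_jid = "" := by
        unfold jid_user_digits_py; rw [if_pos hg]
      rw [this]
      simp
    · rw [if_neg hg]
      rw [jid_digits_eq remote_jid (by simpa using hg)]
      by_cases h2 : (String.ofList (pvCollectDigits remote_jid.toList) == "") = true
      · rw [if_pos h2, if_pos h2]
      · rw [if_neg h2, if_neg h2]
        by_cases h3 : allowed.contains (String.ofList (pvCollectDigits remote_jid.toList)) = true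
        · rw [if_pos h3, h3, Bool.true_or]
        · rw [if_neg h3, Bool.eq_false_iff.mpr h3, Bool.false_or]
          exact suffix_scan_eq _ _ (by simpa using h3)
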